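-- pv_equiv track=rewrite | github.com/dudecon/python | Dorfromantik Helper.py | edgesmatch
-- ===== SOURCE A (Python) =====
-- def compatedge(c1, c2):
--     if c1 == c2: return True # like matches like
--     if (c1 == "A") | (c2 == "A"): return True
--     if (c1 == "W") & (c2 in "GV"): return True
--     if (c2 == "W") & (c1 in "GV"): return True
--     if (c1 == "S") & (c2 in "WGVR"): return True
--     if (c2 == "S") & (c1 in "WGVR"): return True
--     return False
--
-- def edgesmatch(st1, st2):
--     # the first arg should be the shorter string
--     st2len = len(st2)
--     for sti in range(st2len):
--         i = sti
--         for c in st1: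
--             if compatedge(st2[i], c):
--                 i += 1
--                 i %= st2len
--             else: break
--         else:
--             #for loop exhausted, so we have a match
--             return True
--     return False
-- ===== SOURCE B (Python) =====
-- # Column-wise candidate filtering: keep the set of cyclic start offsets still
-- # compatible with the prefix of st1 read so far, instead of re-scanning st1
-- # for each start as A does.
--
-- _PAIRS = {frozenset(p) for p in (("W", "G"), ("W", "V"),
--                                  ("S", "W"), ("S", "G"), ("S", "V"), ("S", "R"))}
--
--
-- def _compat(c1, c2):
--     return c1 == c2 or c1 == "A" or c2 == "A" or frozenset((c1, c2)) in _PAIRS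
--
--
-- def edgesmatch(st1, st2):
--     n = len(st2)
--     if n == 0:
--         return False
--     starts = list(range(n))
--     for j, c in enumerate(st1):
--         starts = [s for s in starts if _compat(st2[(s + j) % n], c)]
--         if not starts:
--             return False
--     return True
-- ===== Notes on version B (the rewrite author's own statement) =====
-- stated objective: alternative
-- what changed: B scans the pattern once column-wise, maintaining the list of cyclic start offsets still alive and pruning it per character (with a table-driven symmetric compatibility relation), instead of A's row-wise rescan of st1 from every start offset.
import Mathlib
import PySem

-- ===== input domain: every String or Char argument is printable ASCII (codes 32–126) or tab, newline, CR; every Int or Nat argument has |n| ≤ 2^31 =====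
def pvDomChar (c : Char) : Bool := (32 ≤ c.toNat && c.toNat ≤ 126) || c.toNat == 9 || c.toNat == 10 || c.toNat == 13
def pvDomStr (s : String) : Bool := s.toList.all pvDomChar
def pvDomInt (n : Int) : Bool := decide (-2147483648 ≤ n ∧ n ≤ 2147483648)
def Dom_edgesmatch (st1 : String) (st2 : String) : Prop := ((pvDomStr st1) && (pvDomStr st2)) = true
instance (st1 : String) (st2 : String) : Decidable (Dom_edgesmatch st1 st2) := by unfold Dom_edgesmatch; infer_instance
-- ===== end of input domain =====

-- B re-implements A column-wise (filtering the set of surviving cyclic start offsets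
-- per pattern character) instead of A's row-wise rescan from every start offset.

-- ===== PORT A =====
def compatedge (c1 : Char) (c2 : Char) : Bool :=
  if c1 = c2 then true
  else if (c1 = 'A') || (c2 = 'A') then true
  else if (c1 = 'W') && (['G', 'V'].contains c2) then true
  else if (c2 = 'W') && (['G', 'V'].contains c1) then true
  else if (c1 = 'S') && (['W', 'G', 'V', 'R'].contains c2) then true
  else if (c2 = 'S') && (['W', 'G', 'V', 'R'].contains c1) then true
  else false

-- inner `for c in st1 … else: return True` loop of A, with running index i (kept < n by `i %= st2len`)
def edgeInner (l2 : List Char) (n : Nat) : List Char → Nat → Bool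
  | [], _ => true
  | c :: rest, i =>
      if compatedge (l2.getD i ' ') c then edgeInner l2 n rest ((i + 1) % n)
      else false

def edgesmatch (st1 : String) (st2 : String) : Bool :=
  let l2 := st2.toList
  let st2len := l2.length
  (List.range st2len).any (fun sti => edgeInner l2 st2len st1.toList sti)

-- ===== PORT B =====
def pvPairs : List (Char × Char) := [('W', 'G'), ('W', 'V'), ('S', 'W'), ('S', 'G'), ('S', 'V'), ('S', 'R')]

-- frozenset((c1, c2)) in _PAIRS: unordered-pair membership in the table
def compatAlt (c1 : Char) (c2 : Char) : Bool :=
  c1 = c2 || c1 = 'A' || c2 = 'A' || pvPairs.contains (c1, c2) || pvPairs.contains (c2, c1)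

-- B's loop over the pattern characters, filtering the surviving start offsets
def altGo (l2 : List Char) (n : Nat) : List Char → Nat → List Nat → Bool
  | [], _, _ => true
  | c :: rest, j, starts =>
      let starts' := starts.filter (fun s => compatAlt (l2.getD ((s + j) % n) ' ') c)
      if starts'.isEmpty then false else altGo l2 n rest (j + 1) starts'

def edgesmatch_alt (st1 : String) (st2 : String) : Bool :=
  let l2 := st2.toList
  let n := l2.length
  if n = 0 then false
  else altGo l2 n st1.toList 0 (List.range n)

-- ===== PRECONDITION & SPEC =====
def Spec_edgesmatch (st1 : String) (st2 : String) (out : Bool) : Prop := out = edgesmatch_alt st1 st2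
instance (st1 : String) (st2 : String) (out : Bool) : Decidable (Spec_edgesmatch st1 st2 out) := by unfold Spec_edgesmatch; infer_instance

-- ===== CLAIM (what is proved, stated in full; the proofs are below) =====
def Claim_equal_edgesmatch : Prop := ∀ (st1 : String) (st2 : String), Dom_edgesmatch st1 st2 → Spec_edgesmatch st1 st2 (edgesmatch st1 st2)

-- ===== LEMMAS AND PROOFS =====

-- the two compatibility tests agree pointwise
theorem compat_eq (c1 c2 : Char) : compatedge c1 c2 = compatAlt c1 c2 := by
  simp only [compatedge, compatAlt, pvPairs, List.contains_cons, List.contains_nil]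
  split_ifs <;> simp_all [Prod.ext_iff]

-- characterisation of A's inner loop: all pattern chars match cyclically from offset i
theorem edgeInner_iff (l2 : List Char) (n : Nat) (hpos : 0 < n) :
    ∀ (l1 : List Char) (i : Nat), i < n →
      (edgeInner l2 n l1 i = true ↔
        ∀ j < l1.length, compatedge (l2.getD ((i + j) % n) ' ') (l1.getD j ' ') = true) := by
  intro l1
  induction l1 with
  | nil => intro i hi; simp [edgeInner]
  | cons c rest ih =>
      intro i hi
      simp only [edgeInner]
      by_cases hc : compatedge (l2.getD i ' ') c = true
      · rw [if_pos hc, ih ((i + 1) % n) (Nat.mod_lt _ hpos)]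
        constructor
        · intro h j hj
          cases j with
          | zero => simpa [Nat.mod_eq_of_lt hi] using hc
          | succ k =>
              have := h k (by simpa using hj)
              have harith : ((i + 1) % n + k) % n = (i + (k + 1)) % n := by
                rw [Nat.mod_add_mod]; congr 1; omega
              simpa [harith] using this
        · intro h k hk
          have := h (k + 1) (by simpa using Nat.succ_lt_succ hk)
          have harith : ((i + 1) % n + k) % n = (i + (k + 1)) % n := by
            rw [Nat.mod_add_mod]; congr 1; omega
          simpa [harith] using this
      · rw [if_neg hc]
        simp only [Bool.false_eq_true, false_iff]
        intro h
        exact hc (by simpa [Nat.mod_eq_of_lt hi] using h 0 (by simp))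

-- characterisation of B's loop: some surviving start matches the whole remaining pattern
theorem altGo_iff (l2 : List Char) (n : Nat) :
    ∀ (l1 : List Char) (j : Nat) (starts : List Nat), starts ≠ [] →
      (altGo l2 n l1 j starts = true ↔
        ∃ s ∈ starts, ∀ k < l1.length,
          compatAlt (l2.getD ((s + (j + k)) % n) ' ') (l1.getD k ' ') = true) := by
  intro l1
  induction l1 with
  | nil =>
      intro j starts hne
      obtain ⟨s, hs⟩ := List.exists_mem_of_ne_nil starts hne
      simp only [altGo]
      constructor
      · intro _
        exact ⟨s, hs, fun k hk => absurd hk (by simp)⟩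
      · intro _
        trivial
  | cons c rest ih =>
      intro j starts hne
      simp only [altGo]
      by_cases he : (starts.filter (fun s => compatAlt (l2.getD ((s + j) % n) ' ') c)).isEmpty
      · rw [if_pos he]
        rw [List.isEmpty_iff] at he
        simp only [Bool.false_eq_true, false_iff]
        rintro ⟨s, hs, hall⟩
        have h0 : compatAlt (l2.getD ((s + j) % n) ' ') c = true := by
          simpa using hall 0 (by simp)
        have hmemf : s ∈ starts.filter (fun s => compatAlt (l2.getD ((s + j) % n) ' ') c) :=
          List.mem_filter.mpr ⟨hs, h0⟩
        rw [he] at hmemf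
        simp at hmemf
      · rw [if_neg he]
        have hne' : starts.filter (fun s => compatAlt (l2.getD ((s + j) % n) ' ') c) ≠ [] := by
          intro h
          exact he (List.isEmpty_iff.mpr h)
        rw [ih (j + 1) _ hne']
        constructor
        · rintro ⟨s, hs, hall⟩
          obtain ⟨hs', h0⟩ := List.mem_filter.mp hs
          refine ⟨s, hs', ?_⟩
          intro k hk
          cases k with
          | zero => simpa using h0
          | succ k' =>
              have := hall k' (by simpa using hk)
              have harith : s + (j + 1 + k') = s + (j + (k' + 1)) := by omega
              simpa [harith] using this
        · rintro ⟨s, hs, hall⟩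
          have h0 : compatAlt (l2.getD ((s + j) % n) ' ') c = true := by
            simpa using hall 0 (by simp)
          refine ⟨s, List.mem_filter.mpr ⟨hs, h0⟩, ?_⟩
          intro k hk
          have := hall (k + 1) (by simpa using Nat.succ_lt_succ hk)
          have harith : s + (j + (k + 1)) = s + (j + 1 + k) := by omega
          simpa [harith] using this

-- the two top-level programs agree on the underlying character lists (nonempty st2)
theorem lists_eq (l2 l1 : List Char) (hpos : 0 < l2.length) :
    (List.range l2.length).any (fun sti => edgeInner l2 l2.length l1 sti) =
      altGo l2 l2.length l1 0 (List.range l2.length) := by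
  rw [Bool.eq_iff_iff, List.any_eq_true,
    altGo_iff l2 l2.length l1 0 (List.range l2.length)
      (by intro h; rw [List.range_eq_nil] at h; omega)]
  constructor
  · rintro ⟨sti, hmem, hrun⟩
    have hlt := List.mem_range.mp hmem
    rw [edgeInner_iff l2 l2.length hpos l1 sti hlt] at hrun
    exact ⟨sti, hmem, fun k hk => by simpa [compat_eq] using hrun k hk⟩
  · rintro ⟨s, hs, hall⟩
    have hlt := List.mem_range.mp hs
    refine ⟨s, hs, ?_⟩
    rw [edgeInner_iff l2 l2.length hpos l1 s hlt]
    intro k hk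
    rw [compat_eq]
    simpa using hall k hk

theorem edgesmatch_eq (st1 st2 : String) : edgesmatch st1 st2 = edgesmatch_alt st1 st2 := by
  show (List.range st2.toList.length).any
      (fun sti => edgeInner st2.toList st2.toList.length st1.toList sti) =
    (if st2.toList.length = 0 then false
      else altGo st2.toList st2.toList.length st1.toList 0 (List.range st2.toList.length))
  by_cases hpos : 0 < st2.toList.length
  · rw [if_neg (by omega)]
    exact lists_eq st2.toList st1.toList hpos
  · have h0 : st2.toList.length = 0 := by omega
    rw [if_pos h0]
    simp [h0]

-- ===== VERDICT (by name: the statement is the Claim_ definition above) =====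
theorem edgesmatch_spec : Claim_equal_edgesmatch := by
  intro st1 st2 _
  exact edgesmatch_eq st1 st2
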